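-- pv_equiv track=rewrite | github.com/pedroangelini/aoc2024 | day4_find_xmas.py | skew_up
-- ===== SOURCE A (Python) =====
-- def empty_board(rows: int, cols: int | None = None) -> list[list[str]]:
--     if cols is None:
--         cols = rows
--     return [list("_" * cols) for _ in range(rows)]
--
-- def skew_up(board: list[list[str]]) -> list[list[str]]:
--     rows = len(board)
--     cols = len(board[0])
--     skewed = empty_board(rows * 2 - 1, cols)
--     # print_nice(rotated)
--     for i in range(rows):  # lines
--         for j in range(cols):  # cols
--             skewed[i + rows - 1 - j][j] = board[i][j]
--
--     return skewed
-- ===== SOURCE B (Python) =====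
-- def skew_up(board: list[list[str]]) -> list[list[str]]:
--     rows = len(board)
--     cols = len(board[0])
--     return [
--         [
--             board[r - rows + 1 + j][j] if 0 <= r - rows + 1 + j < rows else "_"
--             for j in range(cols)
--         ]
--         for r in range(rows * 2 - 1)
--     ]
-- ===== Notes on version B (the rewrite author's own statement) =====
-- stated objective: idiomatic
-- what changed: B builds the skewed board by gathering: a nested comprehension computes each output cell's source row by inverting the index map, instead of allocating an empty board and scattering mutating writes into it.
-- intended difference: On boards wider than tall that hold a non-'_' cell board[i][j] with j >= i+rows, A's scatter index i+rows-1-j goes negative and Python wraps it to the bottom of the output, placing that cell there; B leaves the filler '_' at those positions, which is the intended value for cells off every diagonal. — e.g. on skew_up([["a", "b", "c"], ["d", "e", "f"]]): A returns [["_", "b", "f"], ["a", "e", "_"], ["d", "_", "c"]], B returns [["_", "b", "f"], ["a", "e", "_"], ["d", "_", "_"]]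
import Mathlib
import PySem

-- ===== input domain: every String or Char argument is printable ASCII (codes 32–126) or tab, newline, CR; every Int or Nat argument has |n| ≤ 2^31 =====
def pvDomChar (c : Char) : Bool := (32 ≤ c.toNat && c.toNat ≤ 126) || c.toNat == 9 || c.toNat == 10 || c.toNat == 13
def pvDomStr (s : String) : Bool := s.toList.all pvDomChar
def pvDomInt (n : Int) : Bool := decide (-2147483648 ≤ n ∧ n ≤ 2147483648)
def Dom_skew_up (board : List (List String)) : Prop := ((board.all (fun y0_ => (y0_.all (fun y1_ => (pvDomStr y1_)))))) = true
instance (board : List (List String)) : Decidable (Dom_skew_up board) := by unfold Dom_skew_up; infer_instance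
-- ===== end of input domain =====

-- B gathers each output cell from its source row by inverting the index map (a nested
-- comprehension) instead of allocating an empty board and scattering mutating writes (idiomatic).

-- ===== PORT A =====
-- helper: Python's empty_board(rows, cols) = [list("_"*cols) for _ in range(rows)]
def empty_board (rows : Nat) (cols : Nat) : List (List String) :=
  List.replicate rows (List.replicate cols "_")

-- Python's `skewed[t][j] = v` with a possibly negative t (negative indices wrap by +len);
-- where Python would raise IndexError (t < -len or t ≥ len) this is the identity — those
-- inputs are excluded by Pre_skew_up.
def setCell (sk : List (List String)) (t : Int) (j : Nat) (v : String) : List (List String) :=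
  let k : Int := if t < 0 then t + (sk.length : Int) else t
  if 0 ≤ k then sk.modify k.toNat (fun row => row.set j v) else sk

-- body of the inner loop: skewed[i + rows - 1 - j][j] = board[i][j]
def skewWrite (board : List (List String)) (sk : List (List String)) (i j : Nat) : List (List String) :=
  setCell sk ((i : Int) + (board.length : Int) - 1 - (j : Int)) j ((board.getD i []).getD j "")

-- the inner `for j in range(cols)` loop
def skewRow (board : List (List String)) (cols : Nat) (sk : List (List String)) (i : Nat) : List (List String) :=
  (List.range cols).foldl (fun sk j => skewWrite board sk i j) sk

def skew_up (board : List (List String)) : List (List String) :=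
  let rows := board.length
  let cols := (board.headD []).length
  (List.range rows).foldl (fun sk i => skewRow board cols sk i) (empty_board (2 * rows - 1) cols)

-- ===== PORT B =====
def skew_up_alt (board : List (List String)) : List (List String) :=
  let rows := board.length
  let cols := (board.headD []).length
  (List.range (2 * rows - 1)).map (fun (r : Nat) =>
    (List.range cols).map (fun (j : Nat) =>
      if 0 ≤ (r : Int) - rows + 1 + (j : Int) ∧ (r : Int) - rows + 1 + (j : Int) < rows
      then (board.getD ((r : Int) - rows + 1 + (j : Int)).toNat []).getD j ""
      else "_"))

-- ===== PRECONDITION & SPEC =====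
-- Pre_ is exactly the set of inputs on which Python's skew_up returns: the board is non-empty
-- (board[0]), every row reaches cols = len(board[0]) (board[i][j]), and cols < 3*rows (otherwise
-- the skew index falls below -(2*rows-1) and skewed[...] raises IndexError).
def Pre_skew_up (board : List (List String)) : Prop :=
  board ≠ [] ∧ (∀ row ∈ board, (board.headD []).length ≤ row.length) ∧
    (board.headD []).length < 3 * board.length
instance (board : List (List String)) : Decidable (Pre_skew_up board) := by
  unfold Pre_skew_up; infer_instance

def pvWitness_skew_up : List (List String) := [["a", "b"], ["c", "d"]]

-- On boards wider than tall that hold a non-'_' cell board[i][j] with j ≥ i+rows, A's scatter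
-- index i+rows-1-j goes negative and Python wraps it to the bottom of the output, placing that
-- cell there; B leaves the filler '_' at those positions, the intended value off every diagonal.
def D_skew_up (board : List (List String)) : Prop :=
  ∃ i < board.length, ∃ j < (board.headD []).length,
    board.length + i ≤ j ∧ (board.getD i []).getD j "" ≠ "_"
instance (board : List (List String)) : Decidable (D_skew_up board) := by
  unfold D_skew_up; infer_instance

def Spec_skew_up (board : List (List String)) (out : List (List String)) : Prop :=
  ¬ D_skew_up board → out = skew_up_alt board
instance (board : List (List String)) (out : List (List String)) : Decidable (Spec_skew_up board out) := by
  unfold Spec_skew_up; infer_instance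

def pvDiffWitness_skew_up : List (List String) := [["a", "b", "c"], ["d", "e", "f"]]
def pvDiffWitnessOut_skew_up : (List (List String)) × (List (List String)) :=
  ([["_", "b", "f"], ["a", "e", "_"], ["d", "_", "c"]],
   [["_", "b", "f"], ["a", "e", "_"], ["d", "_", "_"]])

-- ===== CLAIM (what is proved, stated in full; the proofs are below) =====
def Claim_unchanged_skew_up : Prop := ∀ (board : List (List String)), Dom_skew_up board → Pre_skew_up board → Spec_skew_up board (skew_up board)
def Claim_changed_skew_up : Prop := Dom_skew_up (pvDiffWitness_skew_up) ∧ Pre_skew_up (pvDiffWitness_skew_up) ∧ D_skew_up (pvDiffWitness_skew_up) ∧ skew_up (pvDiffWitness_skew_up) = pvDiffWitnessOut_skew_up.1 ∧ skew_up_alt (pvDiffWitness_skew_up) = pvDiffWitnessOut_skew_up.2 ∧ pvDiffWitnessOut_skew_up.1 ≠ pvDiffWitnessOut_skew_up.2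
def Claim_exact_skew_up : Prop := ∀ (board : List (List String)), Dom_skew_up board → Pre_skew_up board → D_skew_up board → skew_up board ≠ skew_up_alt board

-- ===== LEMMAS AND PROOFS =====

-- board[i][j] (totalized as the ports totalize it)
def cellF (board : List (List String)) (i j : Nat) : String := (board.getD i []).getD j ""

-- the wrapped destination row of write (i, j), as the ports compute it
def dstOf (n i j : Nat) : Int :=
  if (i : Int) + n - 1 - j < 0 then (i : Int) + n - 1 - j + ((2 * n - 1 : Nat) : Int)
  else (i : Int) + n - 1 - j

-- entry (r, j) of the skewed board after the first m outer iterations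
def entryF (board : List (List String)) (m r j : Nat) : String :=
  let n := board.length
  let iA : Int := (r : Int) - n + 1 + j
  let iB : Int := iA - ((2 * n - 1 : Nat) : Int)
  if 0 ≤ iA ∧ iA < m then cellF board iA.toNat j
  else if 0 ≤ iB ∧ iB < m then cellF board iB.toNat j
  else "_"

theorem getElem?_modify' {α : Type} (f : α → α) (k : Nat) (l : List α) (r : Nat) :
    (l.modify k f)[r]? = if k = r then (l[r]?).map f else l[r]? := by
  rw [List.getElem?_modify]
  by_cases h : k = r
  · rw [if_pos h]
    cases hx : l[r]? with
    | none => rfl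
    | some x =>
      show some (if k = r then f x else x) = some (f x)
      rw [if_pos h]
  · rw [if_neg h]
    cases hx : l[r]? with
    | none => rfl
    | some x =>
      show some (if k = r then f x else x) = some x
      rw [if_neg h]

theorem skewRow_char (board : List (List String)) (c i : Nat) (m : Nat) (hm : m ≤ c)
    (sk : List (List String)) (hlen : sk.length = 2 * board.length - 1)
    (hrow : ∀ (r : Nat) (row : List String), sk[r]? = some row → row.length = c) :
    ((List.range m).foldl (fun sk j => skewWrite board sk i j) sk).length = 2 * board.length - 1 ∧
    (∀ (r : Nat) (row : List String), ((List.range m).foldl (fun sk j => skewWrite board sk i j) sk)[r]? = some row → row.length = c) ∧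
    (∀ r j, r < 2 * board.length - 1 → j < c →
      (((List.range m).foldl (fun sk j => skewWrite board sk i j) sk)[r]?.getD [])[j]? =
        (if dstOf board.length i j = (r : Int) ∧ j < m then some (cellF board i j)
         else (sk[r]?.getD [])[j]?)) := by
  induction m with
  | zero =>
    refine ⟨hlen, hrow, ?_⟩
    intro r j hr hj
    simp only [List.range_zero, List.foldl_nil]
    rw [if_neg (by omega)]
  | succ m ih =>
    obtain ⟨ih1, ih2, ih3⟩ := ih (by omega)
    set F := (List.range m).foldl (fun sk j => skewWrite board sk i j) sk with hF
    have hstep : (List.range (m + 1)).foldl (fun sk j => skewWrite board sk i j) sk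
        = skewWrite board F i m := by
      rw [List.range_succ, List.foldl_append, List.foldl_cons, List.foldl_nil]
    rw [hstep]
    unfold skewWrite setCell
    set t : Int := (i : Int) + (board.length : Int) - 1 - (m : Int) with ht
    set k : Int := if t < 0 then t + (F.length : Int) else t with hk
    have hdk : dstOf board.length i m = k := by
      rw [dstOf, hk, ih1]
    by_cases hknn : 0 ≤ k
    · simp only [hknn, if_true]
      refine ⟨by simpa [List.length_modify] using ih1, ?_, ?_⟩
      · intro r row hrow'
        rw [getElem?_modify'] at hrow'
        by_cases hkr : k.toNat = r
        · rw [if_pos hkr] at hrow'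
          rcases hFr : F[r]? with _ | row0 <;> rw [hFr] at hrow'
          · simp at hrow'
          · simp only [Option.map_some, Option.some_inj] at hrow'
            rw [← hrow']
            simpa [List.length_set] using ih2 r row0 hFr
        · rw [if_neg hkr] at hrow'
          exact ih2 r row hrow'
      · intro r j hr hj
        have hrF : r < F.length := by omega
        have hFr : F[r]? = some (F[r]'hrF) := List.getElem?_eq_getElem hrF
        have hlen0 : (F[r]'hrF).length = c := ih2 r _ hFr
        rw [getElem?_modify', hFr]
        by_cases hkr : k.toNat = r
        · rw [if_pos hkr]
          simp only [Option.map_some, Option.getD_some]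
          by_cases hjm : j = m
          · subst hjm
            rw [List.getElem?_set, if_pos rfl, if_pos (by omega)]
            rw [if_pos ?_]
            · rfl
            · exact ⟨by rw [hdk]; omega, by omega⟩
          · rw [List.getElem?_set, if_neg (fun h => hjm h.symm)]
            have hih := ih3 r j hr hj
            rw [hFr] at hih
            simp only [Option.getD_some] at hih
            rw [hih]
            by_cases hc : dstOf board.length i j = (r : Int) ∧ j < m
            · rw [if_pos hc, if_pos ⟨hc.1, by omega⟩]
            · rw [if_neg hc, if_neg (by intro h; exact hc ⟨h.1, by omega⟩)]
        · rw [if_neg hkr]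
          simp only [Option.getD_some]
          have hih := ih3 r j hr hj
          rw [hFr] at hih
          simp only [Option.getD_some] at hih
          rw [hih]
          by_cases hjm : j = m
          · subst hjm
            rw [if_neg (by omega), if_neg ?_]
            intro h
            have hdd : dstOf board.length i j = k := hdk
            omega
          · by_cases hc : dstOf board.length i j = (r : Int) ∧ j < m
            · rw [if_pos hc, if_pos ⟨hc.1, by omega⟩]
            · rw [if_neg hc, if_neg (by intro h; exact hc ⟨h.1, by omega⟩)]
    · simp only [hknn, if_false]
      refine ⟨ih1, ih2, ?_⟩
      intro r j hr hj
      rw [ih3 r j hr hj]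
      by_cases hjm : j = m
      · subst hjm
        rw [if_neg (by omega), if_neg ?_]
        intro h
        have hdd : dstOf board.length i j = k := hdk
        omega
      · by_cases hc : dstOf board.length i j = (r : Int) ∧ j < m
        · rw [if_pos hc, if_pos ⟨hc.1, by omega⟩]
        · rw [if_neg hc, if_neg (by intro h; exact hc ⟨h.1, by omega⟩)]

theorem skew_fold_char (board : List (List String)) (c m : Nat) (hm : m ≤ board.length) :
    ((List.range m).foldl (fun sk i => skewRow board c sk i) (empty_board (2 * board.length - 1) c)).length = 2 * board.length - 1 ∧
    (∀ (r : Nat) (row : List String), ((List.range m).foldl (fun sk i => skewRow board c sk i) (empty_board (2 * board.length - 1) c))[r]? = some row → row.length = c) ∧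
    (∀ r j, r < 2 * board.length - 1 → j < c →
      (((List.range m).foldl (fun sk i => skewRow board c sk i) (empty_board (2 * board.length - 1) c))[r]?.getD [])[j]? =
        some (entryF board m r j)) := by
  induction m with
  | zero =>
    refine ⟨by simp [empty_board], ?_, ?_⟩
    · intro r row h
      simp only [List.range_zero, List.foldl_nil, empty_board] at h
      rw [List.getElem?_replicate] at h
      split_ifs at h
      simp only [Option.some_inj] at h
      rw [← h, List.length_replicate]
    · intro r j hr hj
      simp only [List.range_zero, List.foldl_nil, empty_board]
      rw [List.getElem?_replicate, if_pos hr]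
      simp only [Option.getD_some]
      rw [List.getElem?_replicate, if_pos hj]
      simp only [entryF]
      rw [if_neg (by omega), if_neg (by omega)]
  | succ m ih =>
    obtain ⟨ih1, ih2, ih3⟩ := ih (by omega)
    set F := (List.range m).foldl (fun sk i => skewRow board c sk i) (empty_board (2 * board.length - 1) c) with hFdef
    have hstep : (List.range (m + 1)).foldl (fun sk i => skewRow board c sk i) (empty_board (2 * board.length - 1) c)
        = skewRow board c F m := by
      rw [List.range_succ, List.foldl_append, List.foldl_cons, List.foldl_nil]
    rw [hstep]
    obtain ⟨g1, g2, g3⟩ := skewRow_char board c m c (le_refl c) F ih1 ih2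
    rw [skewRow]
    refine ⟨g1, g2, ?_⟩
    intro r j hr hj
    rw [g3 r j hr hj]
    have hm' : m < board.length := by omega
    by_cases hd : dstOf board.length m j = (r : Int) ∧ j < c
    · rw [if_pos hd]
      simp only [entryF]
      have hd1 := hd.1
      rw [dstOf] at hd1
      split_ifs at hd1 with hneg
      · rw [if_neg (by omega), if_pos (by constructor <;> omega)]
        have h2 : ((r : Int) - ↑board.length + 1 + ↑j - ((2 * board.length - 1 : Nat) : Int)).toNat = m := by
          omega
        rw [h2]
      · rw [if_pos (by constructor <;> omega)]
        have h2 : ((r : Int) - ↑board.length + 1 + ↑j).toNat = m := by omega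
        rw [h2]
    · rw [if_neg hd, ih3 r j hr hj]
      have hd' : ¬ dstOf board.length m j = (r : Int) := fun h => hd ⟨h, hj⟩
      rw [dstOf] at hd'
      simp only [entryF, Option.some_inj]
      by_cases hneg : (m : Int) + ↑board.length - 1 - ↑j < 0
      · rw [if_pos hneg] at hd'
        split_ifs <;> first | rfl | (exfalso; omega)
      · rw [if_neg hneg] at hd'
        split_ifs <;> first | rfl | (exfalso; omega)

theorem getElem?_range' (n i : Nat) (h : i < n) : (List.range n)[i]? = some i := by
  simp [h]

theorem alt_len (board : List (List String)) : (skew_up_alt board).length = 2 * board.length - 1 := by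
  simp [skew_up_alt]

theorem alt_entry (board : List (List String)) (r j : Nat)
    (hr : r < 2 * board.length - 1) (hj : j < (board.headD []).length) :
    ((skew_up_alt board)[r]?.getD [])[j]? =
      some (if 0 ≤ (r : Int) - board.length + 1 + j ∧ (r : Int) - board.length + 1 + j < board.length
            then (board.getD ((r : Int) - board.length + 1 + j).toNat []).getD j "" else "_") := by
  simp only [skew_up_alt]
  rw [List.getElem?_map, getElem?_range' _ r hr]
  simp only [Option.map_some, Option.getD_some]
  rw [List.getElem?_map, getElem?_range' _ j hj]
  rfl

theorem entry_eq_alt (board : List (List String)) (hD : ¬ D_skew_up board) (r j : Nat)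
    (hr : r < 2 * board.length - 1) (hj : j < (board.headD []).length) :
    entryF board board.length r j =
      (if 0 ≤ (r : Int) - ↑board.length + 1 + (j : Int) ∧ (r : Int) - ↑board.length + 1 + (j : Int) < ↑board.length
       then (board.getD ((r : Int) - ↑board.length + 1 + (j : Int)).toNat []).getD j "" else "_") := by
  simp only [entryF]
  split_ifs with h1 h2
  · rfl
  · by_contra hne
    exact hD ⟨_, by omega, j, hj, by omega, hne⟩
  · rfl

-- ===== VERDICT (by name: the statement is the Claim_ definition above) =====
set_option maxHeartbeats 800000 in
theorem skew_up_spec : Claim_unchanged_skew_up := by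
  intro board _ _ hD
  obtain ⟨f1, f2, f3⟩ :=
    skew_fold_char board (board.headD []).length board.length (le_refl board.length)
  have hA : skew_up board = (List.range board.length).foldl
      (fun sk i => skewRow board (board.headD []).length sk i)
      (empty_board (2 * board.length - 1) (board.headD []).length) := rfl
  have hAlen : (skew_up board).length = 2 * board.length - 1 := by rw [hA]; exact f1
  have hBlen := alt_len board
  apply List.ext_getElem?
  intro r
  by_cases hr : r < 2 * board.length - 1
  · have hApos : r < (skew_up board).length := by omega
    have hBr : (skew_up_alt board)[r]? = some ((List.range (board.headD []).length).map (fun (j : Nat) =>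
        if 0 ≤ (r : Int) - ↑board.length + 1 + (j : Int) ∧ (r : Int) - ↑board.length + 1 + (j : Int) < ↑board.length
        then (board.getD ((r : Int) - ↑board.length + 1 + (j : Int)).toNat []).getD j "" else "_")) := by
      simp only [skew_up_alt]
      rw [List.getElem?_map, getElem?_range' _ r hr]
      rfl
    rw [List.getElem?_eq_getElem hApos, hBr, Option.some_inj]
    have hAlenrow : ((skew_up board)[r]'hApos).length = (board.headD []).length := by
      exact f2 r _ (by rw [← hA]; exact List.getElem?_eq_getElem hApos)
    apply List.ext_getElem?
    intro j
    by_cases hj : j < (board.headD []).length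
    · have eA : ((skew_up board)[r]'hApos)[j]? = some (entryF board board.length r j) := by
        have h' := f3 r j hr hj
        rw [← hA, List.getElem?_eq_getElem hApos] at h'
        simpa using h'
      rw [eA, List.getElem?_map, getElem?_range' _ j hj]
      simp only [Option.map_some]
      rw [Option.some_inj]
      exact entry_eq_alt board hD r j hr hj
    · rw [List.getElem?_eq_none (by omega),
        List.getElem?_eq_none (by simp only [List.length_map, List.length_range]; omega)]
  · rw [List.getElem?_eq_none (by omega), List.getElem?_eq_none (by omega)]

theorem skew_up_changed : Claim_changed_skew_up := by
  unfold Claim_changed_skew_up; decide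

theorem skew_up_tight : Claim_exact_skew_up := by
  intro board _ hpre hd heq
  obtain ⟨i, hi, j, hj, hij, hne⟩ := hd
  obtain ⟨hne0, hrag, hc⟩ := hpre
  have hn : board.length ≠ 0 := fun h => hne0 (List.eq_nil_of_length_eq_zero h)
  have hr : i + 3 * board.length - 2 - j < 2 * board.length - 1 := by omega
  obtain ⟨f1, f2, f3⟩ :=
    skew_fold_char board (board.headD []).length board.length (le_refl board.length)
  have hA : skew_up board = (List.range board.length).foldl
      (fun sk i => skewRow board (board.headD []).length sk i)
      (empty_board (2 * board.length - 1) (board.headD []).length) := rfl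
  have eA := f3 (i + 3 * board.length - 2 - j) j hr hj
  rw [← hA, heq, alt_entry board _ j hr hj, Option.some_inj] at eA
  simp only [entryF] at eA
  split_ifs at eA with h1 h2
  · omega
  · have hiB : ((↑(i + 3 * board.length - 2 - j) : Int) - ↑board.length + 1 + ↑j
        - ((2 * board.length - 1 : Nat) : Int)).toNat = i := by omega
    rw [hiB] at eA
    exact hne eA.symm
  · omega
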